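-- pv_equiv track=rewrite | github.com/bravo81-hash/trade-guardian | api_server.py | get_strategy_dynamic
-- ===== SOURCE A (Python) =====
-- from typing import Dict, List, Optional, Tuple
--
-- def get_strategy_dynamic(trade_name: str, group_name: str, config_dict: Dict) -> str:
--     t_name = str(trade_name).upper().strip()
--     g_name = str(group_name).upper().strip()
--     sorted_strats = sorted(config_dict.items(), key=lambda x: len(str(x[1].get("id", ""))), reverse=True)
--     for strat_name, details in sorted_strats:
--         token = str(details.get("id", "")).upper().strip()
--         if token and token in g_name:
--             return strat_name
--     for strat_name, details in sorted_strats: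
--         token = str(details.get("id", "")).upper().strip()
--         if token and token in t_name:
--             return strat_name
--     return "Other"
-- ===== SOURCE B (Python) =====
-- def get_strategy_dynamic(trade_name: str, group_name: str, config_dict: dict) -> str:
--     t_name = str(trade_name).upper().strip()
--     g_name = str(group_name).upper().strip()
--     best_g = None  # (strat_name, raw id length)
--     best_t = None
--     for strat_name, details in config_dict.items():
--         raw = str(details.get("id", ""))
--         token = raw.upper().strip()
--         if not token:
--             continue
--         k = len(raw)
--         if token in g_name and (best_g is None or k > best_g[1]):
--             best_g = (strat_name, k)
--         if token in t_name and (best_t is None or k > best_t[1]):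
--             best_t = (strat_name, k)
--     if best_g is not None:
--         return best_g[0]
--     if best_t is not None:
--         return best_t[0]
--     return "Other"
-- ===== Notes on version B (the rewrite author's own statement) =====
-- stated objective: simpler
-- what changed: Replaced sort-then-two-scans with a single pass that tracks the best (longest raw id, earliest on ties) group match and trade match, removing the sort entirely.
import Mathlib
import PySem

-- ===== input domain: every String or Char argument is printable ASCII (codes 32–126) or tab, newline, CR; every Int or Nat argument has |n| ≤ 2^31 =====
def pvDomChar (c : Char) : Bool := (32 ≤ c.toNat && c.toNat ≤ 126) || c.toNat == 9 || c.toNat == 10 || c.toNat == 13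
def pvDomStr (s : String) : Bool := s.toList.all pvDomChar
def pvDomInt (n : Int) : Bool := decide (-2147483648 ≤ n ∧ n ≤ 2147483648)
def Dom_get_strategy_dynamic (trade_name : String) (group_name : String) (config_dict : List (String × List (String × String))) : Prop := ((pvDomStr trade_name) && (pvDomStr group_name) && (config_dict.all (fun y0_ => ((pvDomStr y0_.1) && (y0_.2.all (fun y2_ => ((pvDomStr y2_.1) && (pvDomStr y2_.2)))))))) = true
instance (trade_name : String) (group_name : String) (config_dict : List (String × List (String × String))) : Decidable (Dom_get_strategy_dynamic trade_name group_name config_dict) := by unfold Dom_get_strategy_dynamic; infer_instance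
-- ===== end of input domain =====

-- ===== PORT A =====
-- B replaces A's sort-then-two-scans with a single max-tracking pass; return values proved equal (objective: simpler).

-- details.get("id", "") : first-match lookup in the association list
def pvGetId (d : List (String × String)) : String :=
  match d.find? (fun kv => kv.1 == "id") with
  | some kv => kv.2
  | none => ""

-- str(details.get("id", "")).upper().strip() : the match token
def pvTok (x : String × List (String × String)) : String :=
  PySem.Str.strip (PySem.Str.upper (pvGetId x.2))

-- len(str(details.get("id", ""))) : A's sort key (raw length, before upper/strip)
def pvKey (x : String × List (String × String)) : Int :=
  PySem.Str.len (pvGetId x.2)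

-- the loop condition "token and token in tgt"
def pvP (tgt : String) (x : String × List (String × String)) : Bool :=
  !(PySem.Str.len (pvTok x) == 0) && PySem.Str.isIn (pvTok x) tgt

def get_strategy_dynamic (trade_name : String) (group_name : String) (config_dict : List (String × List (String × String))) : String :=
  let t_name := PySem.Str.strip (PySem.Str.upper trade_name)
  let g_name := PySem.Str.strip (PySem.Str.upper group_name)
  let sorted_strats := PySem.List.sorted config_dict pvKey true
  match sorted_strats.find? (pvP g_name) with
  | some x => x.1
  | none =>
    match sorted_strats.find? (pvP t_name) with
    | some x => x.1
    | none => "Other"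

-- ===== PORT B =====
-- one channel of Source B's loop body: keep the stored (strat_name, raw id length) unless this
-- entry matches with a strictly longer raw id
def pvStep (tgt : String) (b : Option (String × Int)) (x : String × List (String × String)) : Option (String × Int) :=
  if PySem.Str.len (pvTok x) == 0 then b
  else if PySem.Str.isIn (pvTok x) tgt &&
          (match b with | none => true | some bb => decide (bb.2 < pvKey x)) then
    some (x.1, pvKey x)
  else b

def get_strategy_dynamic_alt (trade_name : String) (group_name : String) (config_dict : List (String × List (String × String))) : String :=
  let t_name := PySem.Str.strip (PySem.Str.upper trade_name)
  let g_name := PySem.Str.strip (PySem.Str.upper group_name)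
  let best := config_dict.foldl
    (fun (acc : Option (String × Int) × Option (String × Int)) x =>
      (pvStep g_name acc.1 x, pvStep t_name acc.2 x)) (none, none)
  match best.1 with
  | some b => b.1
  | none =>
    match best.2 with
    | some b => b.1
    | none => "Other"

-- ===== PRECONDITION & SPEC =====
def Spec_get_strategy_dynamic (trade_name : String) (group_name : String) (config_dict : List (String × List (String × String))) (out : String) : Prop := out = get_strategy_dynamic_alt trade_name group_name config_dict
instance (trade_name : String) (group_name : String) (config_dict : List (String × List (String × String))) (out : String) : Decidable (Spec_get_strategy_dynamic trade_name group_name config_dict out) := by unfold Spec_get_strategy_dynamic; infer_instance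

-- ===== CLAIM (what is proved, stated in full; the proofs are below) =====
def Claim_equal_get_strategy_dynamic : Prop := ∀ (trade_name : String) (group_name : String) (config_dict : List (String × List (String × String))), Dom_get_strategy_dynamic trade_name group_name config_dict → Spec_get_strategy_dynamic trade_name group_name config_dict (get_strategy_dynamic trade_name group_name config_dict)

-- ===== LEMMAS AND PROOFS =====

theorem pvStep_not_match (tgt : String) (b : Option (String × Int)) (x : String × List (String × String))
    (h : pvP tgt x = false) : pvStep tgt b x = b := by
  unfold pvP at h
  unfold pvStep
  rcases Bool.and_eq_false_iff.mp h with h1 | h1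
  · simp only [Bool.not_eq_false'] at h1
    rw [if_pos h1]
  · by_cases h0 : (PySem.Str.len (pvTok x) == 0) = true
    · rw [if_pos h0]
    · simp only [Bool.not_eq_true] at h0
      rw [if_neg (ne_of_eq_of_ne h0 Bool.false_ne_true), if_neg (by rw [h1, Bool.false_and]; exact Bool.false_ne_true)]

theorem pvStep_match (tgt : String) (b : Option (String × Int)) (x : String × List (String × String))
    (h : pvP tgt x = true) :
    pvStep tgt b x = match b with
      | none => some (x.1, pvKey x)
      | some bb => if bb.2 < pvKey x then some (x.1, pvKey x) else some bb := by
  unfold pvP at h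
  rcases Bool.and_eq_true_iff.mp h with ⟨h1, h2⟩
  simp only [Bool.not_eq_true'] at h1
  unfold pvStep
  rw [if_neg (ne_of_eq_of_ne h1 Bool.false_ne_true)]
  cases b with
  | none => rw [if_pos (by rw [h2, Bool.true_and])]
  | some bb =>
    dsimp only
    by_cases hlt : bb.2 < pvKey x
    · rw [if_pos (by rw [h2, Bool.true_and]; exact decide_eq_true hlt), if_pos hlt]
    · rw [if_neg (by rw [h2, Bool.true_and, decide_eq_false hlt]; exact Bool.false_ne_true), if_neg hlt]

theorem pvInsertBy_split (before : (String × List (String × String)) → (String × List (String × String)) → Bool)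
    (x : String × List (String × String)) (s : List (String × List (String × String))) :
    PySem.List.insertBy before x s =
      s.takeWhile (fun y => !before x y) ++ x :: s.dropWhile (fun y => !before x y) := by
  induction s with
  | nil => rfl
  | cons z t ih =>
    by_cases h : before x z = true
    · simp [PySem.List.insertBy, h]
    · simp only [Bool.not_eq_true] at h
      simp [PySem.List.insertBy, h, ih]

theorem pvDropWhile_lt (s : List (String × List (String × String))) (c : Int)
    (hp : s.Pairwise (fun a b => pvKey b ≤ pvKey a)) :
    ∀ y ∈ s.dropWhile (fun y => !decide (pvKey y < c)), pvKey y < c := by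
  induction s with
  | nil => simp
  | cons z t ih =>
    rcases List.pairwise_cons.mp hp with ⟨hz, ht⟩
    by_cases h : pvKey z < c
    · intro y hy
      rw [List.dropWhile_cons] at hy
      simp only [h, decide_true, Bool.not_true, Bool.false_eq_true, if_false] at hy
      rcases List.mem_cons.mp hy with rfl | hyt
      · exact h
      · exact lt_of_le_of_lt (hz y hyt) h
    · intro y hy
      rw [List.dropWhile_cons] at hy
      simp only [h, decide_false, Bool.not_false, if_true] at hy
      exact ih ht y hy

set_option maxHeartbeats 1000000 in
theorem pvCore (tgt : String) (l : List (String × List (String × String))) :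
    l.foldl (pvStep tgt) none =
      ((PySem.List.sorted l pvKey true).find? (pvP tgt)).map (fun m => (m.1, pvKey m))
    ∧ (∀ m, (PySem.List.sorted l pvKey true).find? (pvP tgt) = some m →
        ∀ y ∈ l, pvP tgt y = true → pvKey y ≤ pvKey m)
    ∧ ((PySem.List.sorted l pvKey true).find? (pvP tgt) = none → ∀ y ∈ l, pvP tgt y = false) := by
  induction l using List.reverseRecOn with
  | nil => simp [PySem.List.sorted]
  | append_singleton l x IH =>
    obtain ⟨IH1, IH2, IH3⟩ := IH
    have hpair : (PySem.List.sorted l pvKey true).Pairwise (fun a b => pvKey b ≤ pvKey a) :=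
      PySem.List.sorted_pairwise_rev l pvKey
    have hsorted : PySem.List.sorted (l ++ [x]) pvKey true
        = PySem.List.insertBy (fun a b => decide (pvKey b < pvKey a)) x (PySem.List.sorted l pvKey true) := by
      rw [PySem.List.sorted_rev_eq_foldl_insertBy, List.foldl_append,
        ← PySem.List.sorted_rev_eq_foldl_insertBy]
      simp only [List.foldl_cons, List.foldl_nil]
    have hsplit : PySem.List.sorted (l ++ [x]) pvKey true
        = (PySem.List.sorted l pvKey true).takeWhile (fun y => !decide (pvKey y < pvKey x))
          ++ x :: (PySem.List.sorted l pvKey true).dropWhile (fun y => !decide (pvKey y < pvKey x)) := by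
      rw [hsorted, pvInsertBy_split]
    set s := PySem.List.sorted l pvKey true with hs
    set s₁ := s.takeWhile (fun y => !decide (pvKey y < pvKey x)) with hs1
    set s₂ := s.dropWhile (fun y => !decide (pvKey y < pvKey x)) with hs2
    have hcat : s₁ ++ s₂ = s := List.takeWhile_append_dropWhile
    have htake : ∀ y ∈ s₁, pvKey x ≤ pvKey y := by
      intro y hy
      have := List.mem_takeWhile_imp hy
      simp only [Bool.not_eq_true', decide_eq_false_iff_not, not_lt] at this
      exact this
    have hdropf : ∀ y ∈ s₂, pvKey y < pvKey x := pvDropWhile_lt s (pvKey x) hpair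
    have hfold : (l ++ [x]).foldl (pvStep tgt) none = pvStep tgt (l.foldl (pvStep tgt) none) x := by
      rw [List.foldl_append]
      simp only [List.foldl_cons, List.foldl_nil]
    cases hF : s.find? (pvP tgt) with
    | none =>
      have hall : ∀ y ∈ s, pvP tgt y = false := by
        intro y hy
        have := List.find?_eq_none.mp hF y hy
        simpa using this
      have h1 : s₁.find? (pvP tgt) = none :=
        List.find?_eq_none.mpr (fun y hy => by simp [hall y ((List.takeWhile_sublist _).subset hy)])
      have h2 : s₂.find? (pvP tgt) = none :=
        List.find?_eq_none.mpr (fun y hy => by simp [hall y ((List.dropWhile_sublist _).subset hy)])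
      have halll : ∀ y ∈ l, pvP tgt y = false := by
        intro y hy; exact hall y ((PySem.List.mem_sorted l pvKey true y).mpr hy)
      rw [IH1, hF] at hfold
      simp only [Option.map_none] at hfold
      by_cases hx : pvP tgt x = true
      · have hnew : (PySem.List.sorted (l ++ [x]) pvKey true).find? (pvP tgt) = some x := by
          rw [hsplit, List.find?_append, h1, Option.none_or, List.find?_cons_of_pos hx]
        refine ⟨?_, ?_, ?_⟩
        · rw [hfold, pvStep_match tgt none x hx, hnew]; rfl
        · intro m hm y hy hpy
          rw [hnew] at hm
          rw [← Option.some.inj hm]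
          rcases List.mem_append.mp hy with hyl | hyx
          · exact absurd hpy (by simp [halll y hyl])
          · rw [List.mem_singleton.mp hyx]
        · intro hnone; rw [hnew] at hnone; exact absurd hnone (by simp)
      · have hx' : pvP tgt x = false := Bool.not_eq_true _ ▸ (by simpa using hx)
        have hnew : (PySem.List.sorted (l ++ [x]) pvKey true).find? (pvP tgt) = none := by
          rw [hsplit, List.find?_append, h1, Option.none_or, List.find?_cons_of_neg (by simp [hx']), h2]
        refine ⟨?_, ?_, ?_⟩
        · rw [hfold, pvStep_not_match tgt none x hx', hnew]; rfl
        · intro m hm; rw [hnew] at hm; exact absurd hm (by simp)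
        · intro _ y hy
          rcases List.mem_append.mp hy with hyl | hyx
          · exact halll y hyl
          · rw [List.mem_singleton.mp hyx]; exact hx'
    | some m =>
      have hpm : pvP tgt m = true := List.find?_some hF
      have hmax : ∀ y ∈ l, pvP tgt y = true → pvKey y ≤ pvKey m := IH2 m hF
      have hor : (s₁.find? (pvP tgt)).or (s₂.find? (pvP tgt)) = some m := by
        rw [← List.find?_append, hcat]; exact hF
      rw [IH1, hF] at hfold
      simp only [Option.map_some] at hfold
      by_cases hx : pvP tgt x = true
      · by_cases hlt : pvKey m < pvKey x
        · have h1 : s₁.find? (pvP tgt) = none := by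
            cases hh : s₁.find? (pvP tgt) with
            | none => rfl
            | some m' =>
              rw [hh, Option.some_or] at hor
              have hm'm : m' = m := Option.some.inj hor
              exact absurd (htake m' (List.mem_of_find?_eq_some hh)) (not_le.mpr (hm'm ▸ hlt))
          have hnew : (PySem.List.sorted (l ++ [x]) pvKey true).find? (pvP tgt) = some x := by
            rw [hsplit, List.find?_append, h1, Option.none_or, List.find?_cons_of_pos hx]
          refine ⟨?_, ?_, ?_⟩
          · rw [hfold, pvStep_match tgt _ x hx, hnew]
            dsimp only
            rw [if_pos hlt]
            rfl
          · intro m' hm' y hy hpy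
            rw [hnew] at hm'
            rw [← Option.some.inj hm']
            rcases List.mem_append.mp hy with hyl | hyx
            · exact le_trans (hmax y hyl hpy) (le_of_lt hlt)
            · rw [List.mem_singleton.mp hyx]
          · intro hnone; rw [hnew] at hnone; exact absurd hnone (by simp)
        · have hnew : (PySem.List.sorted (l ++ [x]) pvKey true).find? (pvP tgt) = some m := by
            cases hh : s₁.find? (pvP tgt) with
            | some m' =>
              rw [hh, Option.some_or] at hor
              rw [hsplit, List.find?_append, hh, Option.some_or]; exact hor
            | none =>
              rw [hh, Option.none_or] at hor
              exact absurd (hdropf m (List.mem_of_find?_eq_some hor)) hlt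
          refine ⟨?_, ?_, ?_⟩
          · rw [hfold, pvStep_match tgt _ x hx, hnew]
            dsimp only
            rw [if_neg hlt]
            rfl
          · intro m' hm' y hy hpy
            rw [hnew] at hm'
            rw [← Option.some.inj hm']
            rcases List.mem_append.mp hy with hyl | hyx
            · exact hmax y hyl hpy
            · rw [List.mem_singleton.mp hyx]; exact not_lt.mp hlt
          · intro hnone; rw [hnew] at hnone; exact absurd hnone (by simp)
      · have hx' : pvP tgt x = false := by simpa using hx
        have hnew : (PySem.List.sorted (l ++ [x]) pvKey true).find? (pvP tgt) = some m := by
          cases hh : s₁.find? (pvP tgt) with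
          | some m' =>
            rw [hh, Option.some_or] at hor
            rw [hsplit, List.find?_append, hh, Option.some_or]; exact hor
          | none =>
            rw [hh, Option.none_or] at hor
            rw [hsplit, List.find?_append, hh, Option.none_or, List.find?_cons_of_neg (by simp [hx'])]
            exact hor
        refine ⟨?_, ?_, ?_⟩
        · rw [hfold, pvStep_not_match tgt _ x hx', hnew]
          rfl
        · intro m' hm' y hy hpy
          rw [hnew] at hm'
          rw [← Option.some.inj hm']
          rcases List.mem_append.mp hy with hyl | hyx
          · exact hmax y hyl hpy
          · exact absurd hpy (by rw [List.mem_singleton.mp hyx] at hpy ⊢; rw [hx'] at hpy; exact (Bool.false_ne_true hpy).elim)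
        · intro hnone; rw [hnew] at hnone; exact absurd hnone (by simp)

-- ===== VERDICT (by name: the statement is the Claim_ definition above) =====
theorem get_strategy_dynamic_spec : Claim_equal_get_strategy_dynamic := by
  intro trade_name group_name config_dict _
  unfold Spec_get_strategy_dynamic get_strategy_dynamic get_strategy_dynamic_alt
  simp only []
  rw [PySem.List.foldl_prod_mk
        (f := pvStep (PySem.Str.strip (PySem.Str.upper group_name)))
        (g := pvStep (PySem.Str.strip (PySem.Str.upper trade_name)))]
  rw [(pvCore (PySem.Str.strip (PySem.Str.upper group_name)) config_dict).1,
      (pvCore (PySem.Str.strip (PySem.Str.upper trade_name)) config_dict).1]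
  cases (PySem.List.sorted config_dict pvKey true).find?
      (pvP (PySem.Str.strip (PySem.Str.upper group_name))) with
  | some m => rfl
  | none =>
    cases (PySem.List.sorted config_dict pvKey true).find?
        (pvP (PySem.Str.strip (PySem.Str.upper trade_name))) with
    | some m => rfl
    | none => rfl
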